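-- pv_equiv track=rewrite | github.com/dengguojie/vue-element-admin | auto_schedule/python/lang/dynamic/schedule/cube_tilingcase.py | _cut_rectangle
-- ===== SOURCE A (Python) =====
-- import copy
--
-- def _cut_rectangle(base, cut):
--     """
--     base, cut: rectangle in (top, bottom, left, right) format
--     """
--
--     gen_rects = []
--     rect = list(base)
--     i = 0
--     while i < len(base):
--         if i % 2 != 0:
--             i = i + 2
--             continue
--
--         if cut[i] > base[i]:
--             rect_tmp = copy.deepcopy(rect)
--             rect_tmp[i] = base[i]
--             rect_tmp[i + 1] = cut[i] - 1
--             gen_rects.append(tuple(rect_tmp))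
--
--         if cut[i + 1] < base[i + 1]:
--             rect_tmp = copy.deepcopy(rect)
--             rect_tmp[i] = cut[i + 1] + 1
--             rect_tmp[i + 1] = base[i + 1]
--             gen_rects.append(tuple(rect_tmp))
--
--         rect[i] = max(base[i], cut[i])
--         rect[i + 1] = min(base[i + 1], cut[i + 1])
--
--         i = i + 2
--
--     return gen_rects
-- ===== SOURCE B (Python) =====
-- def _cut_rectangle(base, cut):
--     """
--     base, cut: rectangle in (top, bottom, left, right) format
--     """
--     # precompute the clipped intersection coordinates once
--     clipped = [max(b, c) if i % 2 == 0 else min(b, c)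
--                for i, (b, c) in enumerate(zip(base, cut))]
--     n = len(base)
--
--     def emit(k):
--         if k >= n:
--             return []
--         pre = clipped[:k]
--         suf = list(base[k + 2:])
--         rects = []
--         if cut[k] > base[k]:
--             rects.append(tuple(pre + [base[k], cut[k] - 1] + suf))
--         if cut[k + 1] < base[k + 1]:
--             rects.append(tuple(pre + [cut[k + 1] + 1, base[k + 1]] + suf))
--         return rects + emit(k + 2)
--
--     return emit(0)
-- ===== Notes on version B (the rewrite author's own statement) =====
-- stated objective: simpler
-- what changed: Replaces the while-loop that deep-copies and mutates a running rect with a one-pass precomputed clipped-intersection list plus a recursion that emits each strip directly as prefix-slice + new pair + suffix-slice (no mutation, no deepcopy).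
import Mathlib
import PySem

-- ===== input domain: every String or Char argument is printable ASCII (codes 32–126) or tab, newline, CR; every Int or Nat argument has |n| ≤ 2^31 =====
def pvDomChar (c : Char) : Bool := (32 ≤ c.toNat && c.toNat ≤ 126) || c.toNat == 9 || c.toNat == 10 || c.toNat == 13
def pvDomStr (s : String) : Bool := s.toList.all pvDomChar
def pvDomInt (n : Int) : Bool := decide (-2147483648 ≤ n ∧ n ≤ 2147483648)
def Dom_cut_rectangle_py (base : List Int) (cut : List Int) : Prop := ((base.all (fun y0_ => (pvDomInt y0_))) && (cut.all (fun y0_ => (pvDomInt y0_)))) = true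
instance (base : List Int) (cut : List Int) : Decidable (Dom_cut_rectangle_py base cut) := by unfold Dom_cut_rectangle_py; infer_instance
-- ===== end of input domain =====

-- B replaces A's deepcopy-and-mutate while loop with a precomputed clipped-intersection
-- list and a recursion emitting each strip as prefix ++ pair ++ suffix (objective: simpler).

-- ===== PORT A =====
-- Literal port of A's while loop; indices are Nat and in range under Pre_, so
-- List.getD/List.set are exact for Python's xs[i] / xs[i] = v there.
def cutA_loop (base cut : List Int) (i : Nat) (rect : List Int) (gen : List (List Int)) : List (List Int) :=
  if _h : i < base.length then
    if i % 2 ≠ 0 then cutA_loop base cut (i + 2) rect gen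
    else
      let gen1 := if cut.getD i 0 > base.getD i 0 then
          gen ++ [(rect.set i (base.getD i 0)).set (i + 1) (cut.getD i 0 - 1)] else gen
      let gen2 := if cut.getD (i + 1) 0 < base.getD (i + 1) 0 then
          gen1 ++ [(rect.set i (cut.getD (i + 1) 0 + 1)).set (i + 1) (base.getD (i + 1) 0)] else gen1
      let rect' := (rect.set i (max (base.getD i 0) (cut.getD i 0))).set (i + 1)
          (min (base.getD (i + 1) 0) (cut.getD (i + 1) 0))
      cutA_loop base cut (i + 2) rect' gen2
  else gen
termination_by base.length - i

def cut_rectangle_py (base : List Int) (cut : List Int) : List (List Int) :=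
  cutA_loop base cut 0 base []

-- ===== PORT B =====
-- clipped = [max(b,c) if i%2==0 else min(b,c) for i,(b,c) in enumerate(zip(base,cut))]
def cutB_clipped (base cut : List Int) : List Int :=
  (PySem.List.enumerate (base.zip cut) 0).map
    (fun p => if p.1 % 2 == 0 then max p.2.1 p.2.2 else min p.2.1 p.2.2)

-- the recursive emit(k); clipped[:k] / base[k+2:] are List.take/drop (Nat bounds, exact)
def cutB_emit (base cut clipped : List Int) (k : Nat) : List (List Int) :=
  if _h : k < base.length then
    let pre := clipped.take k
    let suf := base.drop (k + 2)
    let r1 : List (List Int) := if cut.getD k 0 > base.getD k 0 then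
        [pre ++ [base.getD k 0, cut.getD k 0 - 1] ++ suf] else []
    let r2 : List (List Int) := if cut.getD (k + 1) 0 < base.getD (k + 1) 0 then
        [pre ++ [cut.getD (k + 1) 0 + 1, base.getD (k + 1) 0] ++ suf] else []
    (r1 ++ r2) ++ cutB_emit base cut clipped (k + 2)
  else []
termination_by base.length - k

def cut_rectangle_py_alt (base : List Int) (cut : List Int) : List (List Int) :=
  cutB_emit base cut (cutB_clipped base cut) 0

-- ===== PRECONDITION & SPEC =====
-- A raises IndexError exactly when base has odd length or cut is shorter than base.
def Pre_cut_rectangle_py (base : List Int) (cut : List Int) : Prop :=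
  base.length % 2 = 0 ∧ base.length ≤ cut.length
instance (base : List Int) (cut : List Int) : Decidable (Pre_cut_rectangle_py base cut) := by
  unfold Pre_cut_rectangle_py; infer_instance

def pvWitness_cut_rectangle_py : List Int × List Int := ([0, 5, 0, 5], [1, 4, 1, 4])

def Spec_cut_rectangle_py (base : List Int) (cut : List Int) (out : List (List Int)) : Prop :=
  out = cut_rectangle_py_alt base cut
instance (base : List Int) (cut : List Int) (out : List (List Int)) :
    Decidable (Spec_cut_rectangle_py base cut out) := by unfold Spec_cut_rectangle_py; infer_instance

-- ===== CLAIM (what is proved, stated in full; the proofs are below) =====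
def Claim_equal_cut_rectangle_py : Prop := ∀ (base : List Int) (cut : List Int),
  Dom_cut_rectangle_py base cut → Pre_cut_rectangle_py base cut →
  Spec_cut_rectangle_py base cut (cut_rectangle_py base cut)

-- ===== LEMMAS AND PROOFS =====

theorem enumerate_getElem? {α : Type} (xs : List α) (s : Int) (j : Nat) :
    (PySem.List.enumerate xs s)[j]? = xs[j]?.map (fun x => (s + j, x)) := by
  induction xs generalizing s j with
  | nil => simp [PySem.List.enumerate_nil]
  | cons a t ih =>
    cases j with
    | zero => simp [PySem.List.enumerate_cons]
    | succ j =>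
      simp only [PySem.List.enumerate_cons, List.getElem?_cons_succ, ih]
      cases t[j]? <;> simp <;> ring_nf

theorem clipped_length (base cut : List Int) (h : base.length ≤ cut.length) :
    (cutB_clipped base cut).length = base.length := by
  simp [cutB_clipped, PySem.List.length_enumerate, List.length_zip]
  omega

theorem clipped_getElem (base cut : List Int) (hlen : base.length ≤ cut.length)
    (j : Nat) (hj : j < base.length) :
    (cutB_clipped base cut)[j]'(by rw [clipped_length base cut hlen]; exact hj)
      = if j % 2 = 0 then max (base[j]'hj) (cut[j]'(by omega))
        else min (base[j]'hj) (cut[j]'(by omega)) := by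
  have hz : j < (base.zip cut).length := by simp [List.length_zip]; omega
  have he : j < (PySem.List.enumerate (base.zip cut) 0).length := by
    simp [PySem.List.length_enumerate]; omega
  have h1 : (PySem.List.enumerate (base.zip cut) 0)[j]'he = ((j : Int), (base.zip cut)[j]'hz) := by
    have := enumerate_getElem? (base.zip cut) 0 j
    rw [List.getElem?_eq_getElem he, List.getElem?_eq_getElem hz] at this
    injection this with this
    rw [this]; simp
  simp only [cutB_clipped, List.getElem_map, h1, List.getElem_zip]
  have h2 : (((j : Int)) % 2 == 0) = decide (j % 2 = 0) := by
    by_cases hp : j % 2 = 0 <;> simp [hp] <;> omega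
  rw [h2]
  by_cases hp : j % 2 = 0 <;> simp [hp]

theorem set2_append {α : Type} (pre : List α) (a b v w : α) (suf : List α) :
    ((pre ++ a :: b :: suf).set pre.length v).set (pre.length + 1) w = pre ++ v :: w :: suf := by
  induction pre with
  | nil => rfl
  | cons x t ih =>
    simp only [List.cons_append, List.length_cons, List.set_cons_succ]
    rw [ih]

theorem drop_two (base : List Int) (i : Nat) (h1 : i + 1 < base.length) :
    base.drop i = base[i]'(by omega) :: base[i+1]'h1 :: base.drop (i + 2) := by
  rw [List.drop_eq_getElem_cons (by omega)]
  congr 1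
  rw [List.drop_eq_getElem_cons (by omega)]

-- main loop invariant: A's loop state equals B's remaining emission
theorem loop_eq (base cut : List Int) (hpar : base.length % 2 = 0)
    (hlen : base.length ≤ cut.length) :
    ∀ (i : Nat) (gen : List (List Int)), i % 2 = 0 → i ≤ base.length →
      cutA_loop base cut i ((cutB_clipped base cut).take i ++ base.drop i) gen
        = gen ++ cutB_emit base cut (cutB_clipped base cut) i := by
  intro i
  have hCl : (cutB_clipped base cut).length = base.length := clipped_length base cut hlen
  induction hw : base.length - i using Nat.strong_induction_on generalizing i with
  | _ n ih =>
  intro gen hieven hile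
  by_cases h : i < base.length
  · have hi1 : i + 1 < base.length := by omega
    have hpre_len : ((cutB_clipped base cut).take i).length = i := by simp; omega
    have hdrop := drop_two base i hi1
    have hset : ∀ (v w : Int),
        (((((cutB_clipped base cut).take i) ++ base.drop i).set i v).set (i + 1) w)
          = ((cutB_clipped base cut).take i) ++ v :: w :: base.drop (i + 2) := by
      intro v w
      rw [hdrop]
      have h2 := set2_append ((cutB_clipped base cut).take i) (base[i]'h) (base[i+1]'hi1)
        v w (base.drop (i + 2))
      rw [hpre_len] at h2
      exact h2
    have hbi : base.getD i 0 = base[i] := List.getD_eq_getElem base 0 h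
    have hbi1 : base.getD (i+1) 0 = base[i+1] := List.getD_eq_getElem base 0 hi1
    have hci : cut.getD i 0 = cut[i]'(by omega) := List.getD_eq_getElem cut 0 (by omega)
    have hci1 : cut.getD (i+1) 0 = cut[i+1]'(by omega) := List.getD_eq_getElem cut 0 (by omega)
    have hCi : (cutB_clipped base cut)[i]'(by omega) = max (base[i]'h) (cut[i]'(by omega)) := by
      rw [clipped_getElem base cut hlen i h]; simp [hieven]
    have hCi1 : (cutB_clipped base cut)[i+1]'(by omega)
        = min (base[i+1]'hi1) (cut[i+1]'(by omega)) := by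
      rw [clipped_getElem base cut hlen (i+1) hi1]
      have hodd : ¬ (i + 1) % 2 = 0 := by omega
      simp [hodd]
    -- the updated rect is the clipped prefix one pair longer
    have hrect' :
        (((((cutB_clipped base cut).take i) ++ base.drop i).set i
            (max (base.getD i 0) (cut.getD i 0))).set (i + 1)
          (min (base.getD (i+1) 0) (cut.getD (i+1) 0)))
        = (cutB_clipped base cut).take (i + 2) ++ base.drop (i + 2) := by
      rw [hset]
      have ht2 : (cutB_clipped base cut).take (i + 2)
          = (cutB_clipped base cut).take i
            ++ [(cutB_clipped base cut)[i]'(by omega), (cutB_clipped base cut)[i+1]'(by omega)] := by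
        have ha : (cutB_clipped base cut).take (i+1+1)
            = (cutB_clipped base cut).take (i+1) ++ [(cutB_clipped base cut)[i+1]'(by omega)] := by
          rw [List.take_add_one, List.getElem?_eq_getElem (by omega)]; rfl
        have hb : (cutB_clipped base cut).take (i+1)
            = (cutB_clipped base cut).take i ++ [(cutB_clipped base cut)[i]'(by omega)] := by
          rw [List.take_add_one, List.getElem?_eq_getElem (by omega)]; rfl
        rw [show i + 2 = (i+1)+1 from rfl, ha, hb, List.append_assoc]; rfl
      rw [ht2, hCi, hCi1, hbi, hbi1, hci, hci1]
      simp
    rw [cutA_loop, cutB_emit]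
    simp only [dif_pos h]
    have hne : ¬ i % 2 ≠ 0 := by omega
    rw [if_neg hne]
    have IH : ∀ g : List (List Int),
        cutA_loop base cut (i + 2)
            ((cutB_clipped base cut).take (i + 2) ++ base.drop (i + 2)) g
          = g ++ cutB_emit base cut (cutB_clipped base cut) (i + 2) :=
      fun g => ih (base.length - (i + 2)) (by omega) (i + 2) (by omega) g (by omega) (by omega)
    have hr2 : (cutB_clipped base cut).take i
          ++ (max (base.getD i 0) (cut.getD i 0))
            :: (min (base.getD (i+1) 0) (cut.getD (i+1) 0)) :: base.drop (i+2)
        = (cutB_clipped base cut).take (i + 2) ++ base.drop (i + 2) := by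
      rw [← hset (max (base.getD i 0) (cut.getD i 0))
            (min (base.getD (i+1) 0) (cut.getD (i+1) 0))]
      exact hrect'
    simp only [hset, hr2, IH]
    split_ifs <;> simp [List.append_assoc]
  · have hieq : i = base.length := by omega
    rw [cutA_loop, cutB_emit]
    simp [h, List.take_of_length_le (by omega), List.drop_eq_nil_of_le (by omega)]

-- ===== VERDICT (by name: the statement is the Claim_ definition above) =====
theorem cut_rectangle_py_spec : Claim_equal_cut_rectangle_py := by
  intro base cut _hdom hpre
  obtain ⟨hpar, hlen⟩ := hpre
  unfold Spec_cut_rectangle_py cut_rectangle_py cut_rectangle_py_alt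
  have := loop_eq base cut hpar hlen 0 [] rfl (by omega)
  simpa using this
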